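-- pv_equiv track=rewrite | github.com/cklegendsofficial-max/ckenson | content_pipeline/advanced_video_creator.py | _generate_main_content
-- ===== SOURCE A (Python) =====
-- def _generate_main_content(topic: str, channel_niche: str, target_words: int, template: dict) -> str:
--     """Generate main content section with intelligent structure"""
--
--     # Channel-specific content strategies
--     content_strategies = {
--         'CKLegends': [
--             f"The story of {topic} begins in the depths of ancient wisdom, where every step forward represents a victory for human ingenuity.",
--             f"Through the ages, {topic} has stood as a testament to the unquenchable thirst for knowledge that drives us forward.",
--             f"From the smallest innovations to the grandest achievements, every aspect of {topic} represents a victory for human determination.",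
--             f"The lessons we learn from {topic} are not just about understanding the world around us, but about understanding ourselves."
--         ],
--         'CKCombat': [
--             f"In the arena of {topic}, every challenge presents an opportunity to demonstrate skill and determination.",
--             f"The path to mastery in {topic} requires dedication, practice, and an unyielding spirit.",
--             f"Through the trials of {topic}, we discover that true strength comes from within.",
--             f"Victory in {topic} is not just about winning, but about growing stronger with every challenge."
--         ],
--         'CKDrive': [
--             f"The world of {topic} is driven by passion, precision, and the pursuit of excellence.",
--             f"Every moment in {topic} is an opportunity to push boundaries and exceed expectations.",
--             f"Through {topic}, we learn that success comes from preparation, skill, and determination.",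
--             f"The thrill of {topic} lies not just in the destination, but in the journey of improvement."
--         ],
--         'CKFinanceCore': [
--             f"The principles of {topic} are built on strategic thinking and calculated decision-making.",
--             f"Success in {topic} requires understanding market dynamics and adapting to changing conditions.",
--             f"Through {topic}, we learn that wealth creation is both an art and a science.",
--             f"The future of {topic} is shaped by innovation, technology, and forward-thinking strategies."
--         ],
--         'CKIronWill': [
--             f"The essence of {topic} lies in the unbreakable spirit that refuses to accept defeat.",
--             f"Every obstacle in {topic} is an opportunity to prove that limits are meant to be broken.",
--             f"Through {topic}, we discover that true strength comes from facing challenges head-on.",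
--             f"The journey of {topic} teaches us that success is not given, but earned through persistence."
--         ]
--     }
--
--     # Get channel-specific content
--     strategies = content_strategies.get(channel_niche, [
--         f"The fascinating world of {topic} offers endless opportunities for discovery and growth.",
--         f"Through {topic}, we learn valuable lessons that apply to every aspect of life.",
--         f"The story of {topic} is one of innovation, determination, and human achievement.",
--         f"Exploring {topic} reveals the incredible potential that lies within each of us."
--     ])
--
--     # Build main content
--     content_parts = []
--     remaining_words = target_words
--
--     for strategy in strategies:
--         if remaining_words > 0:
--             content_parts.append(strategy)
--             remaining_words -= len(strategy.split())
--
--     # Add additional content if needed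
--     while remaining_words > 50:
--         additional_content = f"Every aspect of {topic} contributes to our understanding of the world and our place in it."
--         content_parts.append(additional_content)
--         remaining_words -= len(additional_content.split())
--
--     return ' '.join(content_parts)
-- ===== SOURCE B (Python) =====
-- def _generate_main_content(topic: str, channel_niche: str, target_words: int, template: dict) -> str:
--     """Same content, but: pick the used strategies by counting a prefix, and
--     compute the number of trailing padding sentences in closed form instead of a loop."""
--
--     def strategies_for(niche):
--         if niche == 'CKLegends':
--             return [
--                 f"The story of {topic} begins in the depths of ancient wisdom, where every step forward represents a victory for human ingenuity.",
--                 f"Through the ages, {topic} has stood as a testament to the unquenchable thirst for knowledge that drives us forward.",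
--                 f"From the smallest innovations to the grandest achievements, every aspect of {topic} represents a victory for human determination.",
--                 f"The lessons we learn from {topic} are not just about understanding the world around us, but about understanding ourselves."
--             ]
--         if niche == 'CKCombat':
--             return [
--                 f"In the arena of {topic}, every challenge presents an opportunity to demonstrate skill and determination.",
--                 f"The path to mastery in {topic} requires dedication, practice, and an unyielding spirit.",
--                 f"Through the trials of {topic}, we discover that true strength comes from within.",
--                 f"Victory in {topic} is not just about winning, but about growing stronger with every challenge."
--             ]
--         if niche == 'CKDrive':
--             return [
--                 f"The world of {topic} is driven by passion, precision, and the pursuit of excellence.",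
--                 f"Every moment in {topic} is an opportunity to push boundaries and exceed expectations.",
--                 f"Through {topic}, we learn that success comes from preparation, skill, and determination.",
--                 f"The thrill of {topic} lies not just in the destination, but in the journey of improvement."
--             ]
--         if niche == 'CKFinanceCore':
--             return [
--                 f"The principles of {topic} are built on strategic thinking and calculated decision-making.",
--                 f"Success in {topic} requires understanding market dynamics and adapting to changing conditions.",
--                 f"Through {topic}, we learn that wealth creation is both an art and a science.",
--                 f"The future of {topic} is shaped by innovation, technology, and forward-thinking strategies."
--             ]
--         if niche == 'CKIronWill':
--             return [
--                 f"The essence of {topic} lies in the unbreakable spirit that refuses to accept defeat.",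
--                 f"Every obstacle in {topic} is an opportunity to prove that limits are meant to be broken.",
--                 f"Through {topic}, we discover that true strength comes from facing challenges head-on.",
--                 f"The journey of {topic} teaches us that success is not given, but earned through persistence."
--             ]
--         return [
--             f"The fascinating world of {topic} offers endless opportunities for discovery and growth.",
--             f"Through {topic}, we learn valuable lessons that apply to every aspect of life.",
--             f"The story of {topic} is one of innovation, determination, and human achievement.",
--             f"Exploring {topic} reveals the incredible potential that lies within each of us."
--         ]
--
--     strategies = strategies_for(channel_niche)
--
--     # count how many leading strategies fit (word budget still positive before each one)
--     taken = 0
--     used = 0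
--     for s in strategies:
--         if target_words - used <= 0:
--             break
--         used += len(s.split())
--         taken += 1
--     parts = strategies[:taken]
--     remaining = target_words - used
--
--     additional = f"Every aspect of {topic} contributes to our understanding of the world and our place in it."
--     w = len(additional.split())
--     n = (remaining - 50 + w - 1) // w if remaining > 50 else 0
--     parts = parts + [additional] * n
--
--     return ' '.join(parts)
-- ===== Notes on version B (the rewrite author's own statement) =====
-- stated objective: alternative
-- what changed: B replaces A's trailing while-loop padding by a closed-form ceiling-division count of padding sentences (list multiplication), and picks the used strategies by counting a fitting prefix and slicing instead of appending inside the loop; the channel dict becomes an if-chain.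
import Mathlib
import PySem

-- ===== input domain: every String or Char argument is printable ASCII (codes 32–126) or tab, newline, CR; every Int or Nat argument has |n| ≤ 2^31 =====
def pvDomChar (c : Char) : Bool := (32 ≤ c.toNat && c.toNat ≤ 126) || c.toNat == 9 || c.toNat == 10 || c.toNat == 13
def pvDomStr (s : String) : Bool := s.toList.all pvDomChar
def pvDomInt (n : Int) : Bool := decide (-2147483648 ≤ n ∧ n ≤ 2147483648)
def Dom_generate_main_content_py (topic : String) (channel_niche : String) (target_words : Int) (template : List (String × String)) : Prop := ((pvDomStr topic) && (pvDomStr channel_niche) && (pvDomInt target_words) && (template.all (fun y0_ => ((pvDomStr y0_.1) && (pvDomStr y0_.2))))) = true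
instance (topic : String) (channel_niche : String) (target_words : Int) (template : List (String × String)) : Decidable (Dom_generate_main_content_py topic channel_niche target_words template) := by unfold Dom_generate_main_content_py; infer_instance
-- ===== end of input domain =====

-- B replaces A's trailing while-loop padding by a closed-form count (ceiling division)
-- and picks the used strategies by counting a prefix and slicing; objective: alternative.

-- ===== PORT A =====
-- A's trailing `while remaining_words > 50` loop; the `1 ≤ W` conjunct only makes the
-- recursion total (in A, W is a word count of a nonempty sentence, so it always holds).
def pvPadA (additional : String) (W : Int) (r : Int) (parts : List String) : List String :=
  if h : 50 < r ∧ 1 ≤ W then pvPadA additional W (r - W) (parts ++ [additional]) else parts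
termination_by (r - 50).toNat
decreasing_by omega

def generate_main_content_py (topic : String) (channel_niche : String) (target_words : Int) (template : List (String × String)) : String :=
  let content_strategies : PySem.Dict String (List String) := PySem.Dict.ofList [
    ("CKLegends", [
      "The story of " ++ topic ++ " begins in the depths of ancient wisdom, where every step forward represents a victory for human ingenuity.",
      "Through the ages, " ++ topic ++ " has stood as a testament to the unquenchable thirst for knowledge that drives us forward.",
      "From the smallest innovations to the grandest achievements, every aspect of " ++ topic ++ " represents a victory for human determination.",
      "The lessons we learn from " ++ topic ++ " are not just about understanding the world around us, but about understanding ourselves."]),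
    ("CKCombat", [
      "In the arena of " ++ topic ++ ", every challenge presents an opportunity to demonstrate skill and determination.",
      "The path to mastery in " ++ topic ++ " requires dedication, practice, and an unyielding spirit.",
      "Through the trials of " ++ topic ++ ", we discover that true strength comes from within.",
      "Victory in " ++ topic ++ " is not just about winning, but about growing stronger with every challenge."]),
    ("CKDrive", [
      "The world of " ++ topic ++ " is driven by passion, precision, and the pursuit of excellence.",
      "Every moment in " ++ topic ++ " is an opportunity to push boundaries and exceed expectations.",
      "Through " ++ topic ++ ", we learn that success comes from preparation, skill, and determination.",
      "The thrill of " ++ topic ++ " lies not just in the destination, but in the journey of improvement."]),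
    ("CKFinanceCore", [
      "The principles of " ++ topic ++ " are built on strategic thinking and calculated decision-making.",
      "Success in " ++ topic ++ " requires understanding market dynamics and adapting to changing conditions.",
      "Through " ++ topic ++ ", we learn that wealth creation is both an art and a science.",
      "The future of " ++ topic ++ " is shaped by innovation, technology, and forward-thinking strategies."]),
    ("CKIronWill", [
      "The essence of " ++ topic ++ " lies in the unbreakable spirit that refuses to accept defeat.",
      "Every obstacle in " ++ topic ++ " is an opportunity to prove that limits are meant to be broken.",
      "Through " ++ topic ++ ", we discover that true strength comes from facing challenges head-on.",
      "The journey of " ++ topic ++ " teaches us that success is not given, but earned through persistence."])]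
  let strategies := content_strategies.getD channel_niche [
    "The fascinating world of " ++ topic ++ " offers endless opportunities for discovery and growth.",
    "Through " ++ topic ++ ", we learn valuable lessons that apply to every aspect of life.",
    "The story of " ++ topic ++ " is one of innovation, determination, and human achievement.",
    "Exploring " ++ topic ++ " reveals the incredible potential that lies within each of us."]
  let st := strategies.foldl
    (fun (st : List String × Int) strategy =>
      if 0 < st.2 then (st.1 ++ [strategy], st.2 - ((PySem.Str.split₀ strategy).length : Int)) else st)
    ([], target_words)
  let additional_content := "Every aspect of " ++ topic ++ " contributes to our understanding of the world and our place in it."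
  let content_parts := pvPadA additional_content ((PySem.Str.split₀ additional_content).length : Int) st.2 st.1
  PySem.Str.join " " content_parts

-- ===== PORT B =====
def pvAltStrategies (topic : String) (niche : String) : List String :=
  if niche = "CKLegends" then [
    "The story of " ++ topic ++ " begins in the depths of ancient wisdom, where every step forward represents a victory for human ingenuity.",
    "Through the ages, " ++ topic ++ " has stood as a testament to the unquenchable thirst for knowledge that drives us forward.",
    "From the smallest innovations to the grandest achievements, every aspect of " ++ topic ++ " represents a victory for human determination.",
    "The lessons we learn from " ++ topic ++ " are not just about understanding the world around us, but about understanding ourselves."]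
  else if niche = "CKCombat" then [
    "In the arena of " ++ topic ++ ", every challenge presents an opportunity to demonstrate skill and determination.",
    "The path to mastery in " ++ topic ++ " requires dedication, practice, and an unyielding spirit.",
    "Through the trials of " ++ topic ++ ", we discover that true strength comes from within.",
    "Victory in " ++ topic ++ " is not just about winning, but about growing stronger with every challenge."]
  else if niche = "CKDrive" then [
    "The world of " ++ topic ++ " is driven by passion, precision, and the pursuit of excellence.",
    "Every moment in " ++ topic ++ " is an opportunity to push boundaries and exceed expectations.",
    "Through " ++ topic ++ ", we learn that success comes from preparation, skill, and determination.",
    "The thrill of " ++ topic ++ " lies not just in the destination, but in the journey of improvement."]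
  else if niche = "CKFinanceCore" then [
    "The principles of " ++ topic ++ " are built on strategic thinking and calculated decision-making.",
    "Success in " ++ topic ++ " requires understanding market dynamics and adapting to changing conditions.",
    "Through " ++ topic ++ ", we learn that wealth creation is both an art and a science.",
    "The future of " ++ topic ++ " is shaped by innovation, technology, and forward-thinking strategies."]
  else if niche = "CKIronWill" then [
    "The essence of " ++ topic ++ " lies in the unbreakable spirit that refuses to accept defeat.",
    "Every obstacle in " ++ topic ++ " is an opportunity to prove that limits are meant to be broken.",
    "Through " ++ topic ++ ", we discover that true strength comes from facing challenges head-on.",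
    "The journey of " ++ topic ++ " teaches us that success is not given, but earned through persistence."]
  else [
    "The fascinating world of " ++ topic ++ " offers endless opportunities for discovery and growth.",
    "Through " ++ topic ++ ", we learn valuable lessons that apply to every aspect of life.",
    "The story of " ++ topic ++ " is one of innovation, determination, and human achievement.",
    "Exploring " ++ topic ++ " reveals the incredible potential that lies within each of us."]

-- B's first loop: count how many leading strategies fit, and their total word count.
def pvPickB (target : Int) : List String → Int → Int → Int × Int
  | [], taken, used => (taken, used)
  | s :: rest, taken, used =>
    if target - used ≤ 0 then (taken, used)
    else pvPickB target rest (taken + 1) (used + ((PySem.Str.split₀ s).length : Int))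

def generate_main_content_py_alt (topic : String) (channel_niche : String) (target_words : Int) (template : List (String × String)) : String :=
  let strategies := pvAltStrategies topic channel_niche
  let tu := pvPickB target_words strategies 0 0
  let parts := PySem.List.slice strategies none (some tu.1)
  let remaining := target_words - tu.2
  let additional := "Every aspect of " ++ topic ++ " contributes to our understanding of the world and our place in it."
  let w : Int := ((PySem.Str.split₀ additional).length : Int)
  let n : Int := if 50 < remaining then PySem.Int.floordiv (remaining - 50 + w - 1) w else 0
  PySem.Str.join " " (parts ++ List.replicate n.toNat additional)

-- ===== PRECONDITION & SPEC =====
def Spec_generate_main_content_py (topic : String) (channel_niche : String) (target_words : Int) (template : List (String × String)) (out : String) : Prop := out = generate_main_content_py_alt topic channel_niche target_words template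
instance (topic : String) (channel_niche : String) (target_words : Int) (template : List (String × String)) (out : String) : Decidable (Spec_generate_main_content_py topic channel_niche target_words template out) := by unfold Spec_generate_main_content_py; infer_instance

-- ===== CLAIM (what is proved, stated in full; the proofs are below) =====
def Claim_equal_generate_main_content_py : Prop := ∀ (topic : String) (channel_niche : String) (target_words : Int) (template : List (String × String)), Dom_generate_main_content_py topic channel_niche target_words template → Spec_generate_main_content_py topic channel_niche target_words template (generate_main_content_py topic channel_niche target_words template)

-- ===== LEMMAS AND PROOFS =====

-- the step function of A's first loop
def pvStep : List String × Int → String → List String × Int :=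
  fun st strategy =>
    if 0 < st.2 then (st.1 ++ [strategy], st.2 - ((PySem.Str.split₀ strategy).length : Int)) else st

theorem pvStep_skip (l : List String) (parts : List String) (r : Int) (hr : r ≤ 0) :
    l.foldl pvStep (parts, r) = (parts, r) := by
  induction l with
  | nil => rfl
  | cons s rest ih => simp [pvStep, not_lt.2 hr, ih]

theorem pvPickB_shift (target : Int) (l : List String) (t0 used : Int) :
    pvPickB target l t0 used = ((pvPickB target l 0 used).1 + t0, (pvPickB target l 0 used).2) := by
  induction l generalizing t0 used with
  | nil => simp [pvPickB]
  | cons s rest ih =>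
    by_cases h : target - used ≤ 0
    · simp [pvPickB, h]
    · rw [pvPickB, pvPickB, if_neg h, if_neg h, ih, ih (0 + 1)]
      simp
      omega

theorem pvPickB_nonneg (target : Int) (l : List String) (used : Int) :
    0 ≤ (pvPickB target l 0 used).1 := by
  induction l generalizing used with
  | nil => simp [pvPickB]
  | cons s rest ih =>
    by_cases h : target - used ≤ 0
    · simp [pvPickB, h]
    · rw [pvPickB, if_neg h, pvPickB_shift]
      have := ih (used + ((PySem.Str.split₀ s).length : Int))
      omega

theorem pvPick_loop (target : Int) (l : List String) (parts : List String) (used : Int) :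
    l.foldl pvStep (parts, target - used) =
      (parts ++ l.take (pvPickB target l 0 used).1.toNat, target - (pvPickB target l 0 used).2) := by
  induction l generalizing parts used with
  | nil => simp [pvPickB]
  | cons s rest ih =>
    by_cases h : target - used ≤ 0
    · rw [List.foldl_cons]
      have hstep : pvStep (parts, target - used) s = (parts, target - used) := by
        simp [pvStep]; omega
      rw [hstep, pvStep_skip _ _ _ h, pvPickB, if_pos h]
      simp
    · rw [List.foldl_cons]
      have hstep : pvStep (parts, target - used) s =
          (parts ++ [s], target - (used + ((PySem.Str.split₀ s).length : Int))) := by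
        simp only [pvStep]
        rw [if_pos (by omega : (0:Int) < target - used)]
        simp only [Prod.mk.injEq]
        refine ⟨?_, ?_⟩
        · trivial
        · ring
      rw [hstep, ih, pvPickB, if_neg h, show (0:Int) + 1 = 1 from rfl, pvPickB_shift target rest 1]
      have hnn := pvPickB_nonneg target rest (used + ((PySem.Str.split₀ s).length : Int))
      have htn : ((pvPickB target rest 0 (used + ((PySem.Str.split₀ s).length : Int))).1 + 1).toNat
          = (pvPickB target rest 0 (used + ((PySem.Str.split₀ s).length : Int))).1.toNat + 1 := by omega
      simp only [Prod.mk.injEq]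
      refine ⟨?_, ?_⟩
      · rw [htn, List.take_succ_cons]
        simp
      · trivial

-- A's padding loop equals the closed-form replicate count.
theorem pvPad_closed (add : String) (W : Int) (hW : 1 ≤ W) (r : Int) (parts : List String) :
    pvPadA add W r parts =
      parts ++ List.replicate (if 50 < r then (PySem.Int.floordiv (r - 50 + W - 1) W).toNat else 0) add := by
  by_cases hr : 50 < r
  · rw [pvPadA, dif_pos ⟨hr, hW⟩, pvPad_closed add W hW (r - W) (parts ++ [add])]
    by_cases hr2 : 50 < r - W
    · rw [if_pos hr, if_pos hr2]
      have key : PySem.Int.floordiv (r - 50 + W - 1) W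
          = PySem.Int.floordiv (r - W - 50 + W - 1) W + 1 := by
        rw [PySem.Int.floordiv_eq_ediv_of_pos (by omega), PySem.Int.floordiv_eq_ediv_of_pos (by omega)]
        have : r - 50 + W - 1 = (r - W - 50 + W - 1) + 1 * W := by ring
        rw [this, Int.add_mul_ediv_right _ _ (by omega : W ≠ 0)]
      have hnn : 0 ≤ PySem.Int.floordiv (r - W - 50 + W - 1) W := by
        rw [PySem.Int.floordiv_eq_ediv_of_pos (by omega)]
        exact Int.ediv_nonneg (by omega) (by omega)
      rw [key]
      have : (PySem.Int.floordiv (r - W - 50 + W - 1) W + 1).toNat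
          = (PySem.Int.floordiv (r - W - 50 + W - 1) W).toNat + 1 := by omega
      rw [this, List.replicate_succ]
      simp
    · rw [if_pos hr, if_neg hr2]
      have key : PySem.Int.floordiv (r - 50 + W - 1) W = 1 := by
        rw [PySem.Int.floordiv_eq_iff_of_pos (by omega)]
        omega
      rw [key]
      simp
  · rw [pvPadA, dif_neg (by omega), if_neg hr]
    simp
termination_by (r - 50).toNat
decreasing_by omega

-- the dict lookup of A equals B's if-chain
theorem pvStrategies_eq (topic : String) (niche : String) :
    (PySem.Dict.ofList [
      ("CKLegends", [
        "The story of " ++ topic ++ " begins in the depths of ancient wisdom, where every step forward represents a victory for human ingenuity.",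
        "Through the ages, " ++ topic ++ " has stood as a testament to the unquenchable thirst for knowledge that drives us forward.",
        "From the smallest innovations to the grandest achievements, every aspect of " ++ topic ++ " represents a victory for human determination.",
        "The lessons we learn from " ++ topic ++ " are not just about understanding the world around us, but about understanding ourselves."]),
      ("CKCombat", [
        "In the arena of " ++ topic ++ ", every challenge presents an opportunity to demonstrate skill and determination.",
        "The path to mastery in " ++ topic ++ " requires dedication, practice, and an unyielding spirit.",
        "Through the trials of " ++ topic ++ ", we discover that true strength comes from within.",
        "Victory in " ++ topic ++ " is not just about winning, but about growing stronger with every challenge."]),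
      ("CKDrive", [
        "The world of " ++ topic ++ " is driven by passion, precision, and the pursuit of excellence.",
        "Every moment in " ++ topic ++ " is an opportunity to push boundaries and exceed expectations.",
        "Through " ++ topic ++ ", we learn that success comes from preparation, skill, and determination.",
        "The thrill of " ++ topic ++ " lies not just in the destination, but in the journey of improvement."]),
      ("CKFinanceCore", [
        "The principles of " ++ topic ++ " are built on strategic thinking and calculated decision-making.",
        "Success in " ++ topic ++ " requires understanding market dynamics and adapting to changing conditions.",
        "Through " ++ topic ++ ", we learn that wealth creation is both an art and a science.",
        "The future of " ++ topic ++ " is shaped by innovation, technology, and forward-thinking strategies."]),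
      ("CKIronWill", [
        "The essence of " ++ topic ++ " lies in the unbreakable spirit that refuses to accept defeat.",
        "Every obstacle in " ++ topic ++ " is an opportunity to prove that limits are meant to be broken.",
        "Through " ++ topic ++ ", we discover that true strength comes from facing challenges head-on.",
        "The journey of " ++ topic ++ " teaches us that success is not given, but earned through persistence."])]).getD niche [
      "The fascinating world of " ++ topic ++ " offers endless opportunities for discovery and growth.",
      "Through " ++ topic ++ ", we learn valuable lessons that apply to every aspect of life.",
      "The story of " ++ topic ++ " is one of innovation, determination, and human achievement.",
      "Exploring " ++ topic ++ " reveals the incredible potential that lies within each of us."]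
    = pvAltStrategies topic niche := by
  by_cases h1 : niche = "CKLegends"
  · subst h1; rfl
  · by_cases h2 : niche = "CKCombat"
    · subst h2; rfl
    · by_cases h3 : niche = "CKDrive"
      · subst h3; rfl
      · by_cases h4 : niche = "CKFinanceCore"
        · subst h4; rfl
        · by_cases h5 : niche = "CKIronWill"
          · subst h5; rfl
          · simp [PySem.Dict.ofList, PySem.Dict.getD, PySem.Dict.get?, PySem.Dict.update,
              PySem.Dict.insert, PySem.Dict.empty, PySem.Dict.contains, List.foldl, beq_iff_eq,
              pvAltStrategies, h1, h2, h3, h4, h5, Ne.symm h1, Ne.symm h2, Ne.symm h3, Ne.symm h4, Ne.symm h5]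

-- the split₀ worker never returns [] when the current word or the accumulator is nonempty
theorem pvSplitGo_ne_nil (cs : List Char) : ∀ (cur : List Char) (acc : List (List Char)),
    (cur ≠ [] ∨ acc ≠ []) → PySem.Chars.split₀.go cs cur acc ≠ [] := by
  induction cs with
  | nil =>
    intro cur acc h
    rw [PySem.Chars.split₀.go.eq_def]
    dsimp only
    by_cases hc : cur.isEmpty
    · rw [if_pos hc]
      have : acc ≠ [] := by
        rcases h with h | h
        · exact absurd (List.isEmpty_iff.mp hc) h
        · exact h
      simpa using this
    · rw [if_neg hc]
      simp
  | cons c rest ih =>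
    intro cur acc h
    rw [PySem.Chars.split₀.go.eq_def]
    dsimp only
    by_cases hs : PySem.Chars.isspace c
    · rw [if_pos hs]
      by_cases hc : cur.isEmpty
      · rw [if_pos hc]
        apply ih
        right
        rcases h with h | h
        · exact absurd (List.isEmpty_iff.mp hc) h
        · exact h
      · rw [if_neg hc]
        exact ih [] _ (Or.inr (by simp))
    · rw [if_neg hs]
      exact ih (c :: cur) acc (Or.inl (by simp))

-- A's padding sentence always has at least one word
theorem pvW_pos (topic : String) :
    1 ≤ ((PySem.Str.split₀ ("Every aspect of " ++ topic ++ " contributes to our understanding of the world and our place in it.")).length : Int) := by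
  have htl : ("Every aspect of " ++ topic ++ " contributes to our understanding of the world and our place in it.").toList
      = 'E' :: ("very aspect of ".toList ++ topic.toList ++ " contributes to our understanding of the world and our place in it.".toList) := by
    simp [String.toList_append]
  have hne : PySem.Chars.split₀ (("Every aspect of " ++ topic ++ " contributes to our understanding of the world and our place in it.").toList) ≠ [] := by
    rw [htl]
    show PySem.Chars.split₀.go _ [] [] ≠ []
    rw [PySem.Chars.split₀.go.eq_def]
    dsimp only
    rw [if_neg (by decide : ¬ PySem.Chars.isspace 'E' = true)]
    exact pvSplitGo_ne_nil _ ['E'] [] (Or.inl (by simp))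
  have hlen : (PySem.Str.split₀ ("Every aspect of " ++ topic ++ " contributes to our understanding of the world and our place in it.")).length
      = (PySem.Chars.split₀ (("Every aspect of " ++ topic ++ " contributes to our understanding of the world and our place in it.").toList)).length := by
    rw [← PySem.Str.split₀_map_toList, List.length_map]
  have := List.length_pos_iff.mpr hne
  omega

-- ===== VERDICT (by name: the statement is the Claim_ definition above) =====
theorem generate_main_content_py_spec : Claim_equal_generate_main_content_py := by
  intro topic channel_niche target_words template _
  unfold Spec_generate_main_content_py
  simp only [generate_main_content_py, generate_main_content_py_alt]
  rw [pvStrategies_eq]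
  rw [show (fun (st : List String × Int) strategy =>
      if 0 < st.2 then (st.1 ++ [strategy], st.2 - ((PySem.Str.split₀ strategy).length : Int)) else st) = pvStep from rfl]
  have hfold := pvPick_loop target_words (pvAltStrategies topic channel_niche) [] 0
  rw [sub_zero] at hfold
  rw [hfold]
  rw [pvPad_closed _ _ (pvW_pos topic)]
  rw [PySem.List.slice_to _ (pvPickB_nonneg target_words (pvAltStrategies topic channel_niche) 0)]
  simp [apply_ite Int.toNat]
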